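-- pv_equiv track=rewrite | github.com/darya999r/calc | module_racio.py | preparation
-- ===== SOURCE A (Python) =====
-- def preparation(expression):
--     count = 1
--     while " " in expression:
--         expression = expression.replace(" ", "")
--     expression = list(expression)
--     while count < len(expression):
--         if expression[count].isdigit() and expression[count-1].isdigit():
--             expression[count-1] = expression[count-1] + expression[count]
--             expression.pop(count)
--         elif expression[count] == "." and expression[count-1].isdigit():
--             expression[count-1] = expression[count-1] + expression[count]
--             expression.pop(count)
--         elif expression[count].isdigit() and "." in expression[count-1]:
--             expression[count-1] = expression[count-1] + expression[count]
--             expression.pop(count)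
--         else:
--             count += 1
--     return expression
-- ===== SOURCE B (Python) =====
-- def preparation(expression):
--     expression = expression.replace(" ", "")
--     tokens = []
--     i = 0
--     n = len(expression)
--     while i < n:
--         c = expression[i]
--         j = i + 1
--         if c.isdigit():
--             while j < n and expression[j].isdigit():
--                 j += 1
--             if j < n and expression[j] == ".":
--                 j += 1
--                 while j < n and expression[j].isdigit():
--                     j += 1
--         elif c == ".":
--             while j < n and expression[j].isdigit():
--                 j += 1
--         tokens.append(expression[i:j])
--         i = j
--     return tokens
-- ===== Notes on version B (the rewrite author's own statement) =====
-- stated objective: alternative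
-- what changed: A repeatedly merges adjacent one-character tokens in a mutable list with pop, re-testing at the same index; B does a single left-to-right maximal-munch scan that emits each number token (digits, at most one dot, digits - or dot-led digits) in one step.
import Mathlib
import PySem

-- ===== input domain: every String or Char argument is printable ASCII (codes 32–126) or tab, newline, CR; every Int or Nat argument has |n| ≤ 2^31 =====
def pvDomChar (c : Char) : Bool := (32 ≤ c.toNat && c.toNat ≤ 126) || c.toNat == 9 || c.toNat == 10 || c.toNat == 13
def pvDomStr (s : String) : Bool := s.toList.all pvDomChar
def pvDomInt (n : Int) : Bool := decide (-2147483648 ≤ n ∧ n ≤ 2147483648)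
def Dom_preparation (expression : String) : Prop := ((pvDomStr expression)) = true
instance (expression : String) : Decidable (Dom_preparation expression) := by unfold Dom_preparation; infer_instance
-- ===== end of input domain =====

-- Alternative algorithm: A repeatedly merges adjacent one-character tokens in a mutable list
-- (pop + re-test at the same index); B is a single left-to-right maximal-munch scan that emits
-- each number token (digits, at most one dot, digits - or dot-led digits) in one step.

-- ===== PORT A =====
-- Python strings are modelled as List Char internally; tokens become String at the very end.

-- (termination lemma for the space-stripping while-loop: .replace(" ", "") is exactly a filter)
theorem pvReplaceGoSpace (fuel : Nat) : ∀ (l acc : List Char), l.length ≤ fuel →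
    PySem.Chars.replace.go [' '] [] fuel l acc = acc.reverse ++ l.filter (· ≠ ' ') := by
  induction fuel with
  | zero =>
    intro l acc h
    have hl : l = [] := List.length_eq_zero_iff.mp (by omega)
    subst hl
    simp [PySem.Chars.replace.go]
  | succ n ih =>
    intro l acc h
    match l with
    | [] => simp [PySem.Chars.replace.go]
    | c :: t =>
      by_cases hc : c = ' '
      · subst hc
        have hpre : List.isPrefixOf [' '] (' ' :: t) = true := by simp [List.isPrefixOf]
        simp only [PySem.Chars.replace.go, hpre, if_true, List.length_cons, List.length_nil,
          Nat.zero_add, List.drop_succ_cons, List.drop_zero, List.reverse_nil, List.nil_append]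
        rw [ih t acc (by simp at h; omega)]
        simp
      · have hng : List.isPrefixOf [' '] (c :: t) = false := by
          simp [List.isPrefixOf]
          exact fun hx => hc hx.symm
        simp only [PySem.Chars.replace.go, hng, Bool.false_eq_true, if_false]
        rw [ih t (c :: acc) (by simp at h; omega)]
        simp [hc]

theorem pvReplaceSpace (s : List Char) :
    PySem.Chars.replace s [' '] [] = s.filter (· ≠ ' ') := by
  simpa using pvReplaceGoSpace s.length s [] le_rfl

theorem pvIsInSpace (s : List Char) : PySem.Chars.isIn [' '] s = true ↔ ' ' ∈ s := by
  rw [PySem.Chars.isIn_iff_infix]; exact List.singleton_infix_iff _ _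

-- while " " in expression: expression = expression.replace(" ", "")
def remSpaces (s : List Char) : List Char :=
  if PySem.Chars.isIn [' '] s then remSpaces (PySem.Chars.replace s [' '] []) else s
termination_by s.count ' '
decreasing_by
  rename_i h
  rw [pvReplaceSpace]
  have h1 : (s.filter (· ≠ ' ')).count ' ' = 0 := by
    rw [List.count_eq_zero]; intro hm; simpa using (List.mem_filter.mp hm).2
  have h2 : 0 < s.count ' ' := List.count_pos_iff.mpr ((pvIsInSpace s).mp h)
  omega

-- while count < len(expression): merge-or-advance over the list of (string) tokens
def loopA (l : List (List Char)) (count : Nat) : List (List Char) :=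
  if h : count < l.length then
    let cur := l.getD count []
    let prev := l.getD (count - 1) []
    if PySem.Chars.strIsdigit cur && PySem.Chars.strIsdigit prev then
      loopA ((l.set (count - 1) (prev ++ cur)).eraseIdx count) count
    else if decide (cur = ['.']) && PySem.Chars.strIsdigit prev then
      loopA ((l.set (count - 1) (prev ++ cur)).eraseIdx count) count
    else if PySem.Chars.strIsdigit cur && PySem.Chars.isIn ['.'] prev then
      loopA ((l.set (count - 1) (prev ++ cur)).eraseIdx count) count
    else
      loopA l (count + 1)
  else l
termination_by 2 * l.length - count
decreasing_by
  · simp only [List.length_eraseIdx, List.length_set, if_pos h]; omega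
  · simp only [List.length_eraseIdx, List.length_set, if_pos h]; omega
  · simp only [List.length_eraseIdx, List.length_set, if_pos h]; omega
  · omega

def preparation (expression : String) : List String :=
  (loopA ((remSpaces expression.toList).map (fun c => [c])) 1).map (fun t => String.ofList t)

-- ===== PORT B =====
-- inner 'while j < n and expression[j].isdigit(): j += 1' (+ the slice it delimits):
def takeDigits : List Char → List Char × List Char
  | [] => ([], [])
  | c :: cs =>
    if PySem.Chars.isdigit c then
      let p := takeDigits cs
      (c :: p.1, p.2)
    else ([], c :: cs)

theorem takeDigits_snd_le (l : List Char) : (takeDigits l).2.length ≤ l.length := by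
  induction l with
  | nil => simp [takeDigits]
  | cons c cs ih =>
    simp only [takeDigits]
    split <;> (simp; try omega)

-- the main scanning while-loop of B
def tokB : List Char → List (List Char)
  | [] => []
  | c :: cs =>
    if PySem.Chars.isdigit c then
      match hr : (takeDigits cs).2 with
      | '.' :: r' =>
        (c :: (takeDigits cs).1 ++ '.' :: (takeDigits r').1) :: tokB (takeDigits r').2
      | _ => (c :: (takeDigits cs).1) :: tokB (takeDigits cs).2
    else if c = '.' then
      (c :: (takeDigits cs).1) :: tokB (takeDigits cs).2
    else [c] :: tokB cs
termination_by l => l.length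
decreasing_by
  · have h1 := takeDigits_snd_le r'
    have h2 := takeDigits_snd_le cs
    rw [hr] at h2
    simp only [List.length_cons] at *
    omega
  · have := takeDigits_snd_le cs; simp; omega
  · have := takeDigits_snd_le cs; simp; omega
  · simp

def preparation_alt (expression : String) : List String :=
  (tokB (PySem.Chars.replace expression.toList [' '] [])).map (fun t => String.ofList t)

-- ===== PRECONDITION & SPEC =====
def Spec_preparation (expression : String) (out : List String) : Prop := out = preparation_alt expression
instance (expression : String) (out : List String) : Decidable (Spec_preparation expression out) := by unfold Spec_preparation; infer_instance

-- ===== CLAIM (what is proved, stated in full; the proofs are below) =====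
def Claim_equal_preparation : Prop := ∀ (expression : String), Dom_preparation expression → Spec_preparation expression (preparation expression)

-- ===== LEMMAS AND PROOFS =====

theorem pvIsInDot (l : List Char) : PySem.Chars.isIn ['.'] l = true ↔ '.' ∈ l := by
  rw [PySem.Chars.isIn_iff_infix]; exact List.singleton_infix_iff _ _

theorem pvDotChar : PySem.Chars.isdigit '.' = false := by decide

theorem pvDotNotDigitStr (l : List Char) (h : '.' ∈ l) : PySem.Chars.strIsdigit l = false := by
  by_contra hc
  have : PySem.Chars.strIsdigit l = true := by revert hc; cases PySem.Chars.strIsdigit l <;> simp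
  simp only [PySem.Chars.strIsdigit, Bool.and_eq_true, List.all_eq_true] at this
  have := this.2 '.' h
  simp [pvDotChar] at this

theorem pvSingleDigitStr (c : Char) : PySem.Chars.strIsdigit [c] = PySem.Chars.isdigit c := by
  simp [PySem.Chars.strIsdigit]

-- the merge test A applies between the open token `prev` and the next single character `c`
def mergeQ (prev : List Char) (c : Char) : Bool :=
  (PySem.Chars.isdigit c && PySem.Chars.strIsdigit prev) ||
  (decide (c = '.') && PySem.Chars.strIsdigit prev) ||
  (PySem.Chars.isdigit c && PySem.Chars.isIn ['.'] prev)

-- reference fold: tokenize `rest` with `cur` the still-open token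
def F (cur : List Char) : List Char → List (List Char)
  | [] => [cur]
  | c :: cs => if mergeQ cur c then F (cur ++ [c]) cs else cur :: F [c] cs

@[simp] theorem pvTokBNil : tokB [] = [] := by rw [tokB]

theorem pvGetDAppend (d xs : List (List Char)) (k : Nat) :
    (d ++ xs).getD (d.length + k) [] = xs.getD k [] := by
  induction d with
  | nil => simp
  | cons a t ih => simpa [Nat.succ_add] using ih

theorem pvSetAppend (d : List (List Char)) (x : List Char) (t : List (List Char)) (v : List Char) :
    (d ++ x :: t).set d.length v = d ++ v :: t := by
  induction d with
  | nil => simp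
  | cons a s ih => simp [ih]

theorem pvEraseAppend (d : List (List Char)) (x y : List Char) (t : List (List Char)) :
    (d ++ x :: y :: t).eraseIdx (d.length + 1) = d ++ x :: t := by
  induction d with
  | nil => simp
  | cons a s ih => simpa using ih

theorem loopA_canon (rest : List Char) : ∀ (cur : List Char) (done : List (List Char)),
    loopA (done ++ cur :: rest.map (fun c => [c])) (done.length + 1) = done ++ F cur rest := by
  induction rest with
  | nil =>
    intro cur done
    rw [loopA]
    rw [dif_neg (by simp)]
    simp [F]
  | cons c rs ih =>
    intro cur done
    rw [loopA]
    rw [dif_pos (by simp)]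
    have hcur : (done ++ cur :: (c :: rs).map (fun c => [c])).getD (done.length + 1) [] = [c] := by
      have := pvGetDAppend done (cur :: (c :: rs).map (fun c => [c])) 1
      simpa using this
    have hprev : (done ++ cur :: (c :: rs).map (fun c => [c])).getD (done.length + 1 - 1) [] = cur := by
      have := pvGetDAppend done (cur :: (c :: rs).map (fun c => [c])) 0
      simpa using this
    simp only [hcur, hprev]
    have hset : ((done ++ cur :: (c :: rs).map (fun c => [c])).set (done.length + 1 - 1)
        (cur ++ [c])).eraseIdx (done.length + 1) = done ++ (cur ++ [c]) :: rs.map (fun c => [c]) := by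
      simp only [Nat.add_sub_cancel, List.map_cons]
      rw [pvSetAppend]
      exact pvEraseAppend done (cur ++ [c]) [c] (rs.map (fun c => [c]))
    by_cases hm : mergeQ cur c = true
    · have hF : F cur (c :: rs) = F (cur ++ [c]) rs := by simp [F, hm]
      rw [hF]
      simp only [mergeQ, Bool.or_eq_true, Bool.and_eq_true] at hm
      rcases hm with (⟨h1, h2⟩ | ⟨h1, h2⟩) | ⟨h1, h2⟩
      · rw [if_pos (by simp [pvSingleDigitStr, h1, h2])]
        rw [hset]; exact ih (cur ++ [c]) done
      · rw [if_neg ?_, if_pos ?_]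
        · rw [hset]; exact ih (cur ++ [c]) done
        · simp only [decide_eq_true_eq] at h1; simp [h1, h2]
        · simp only [decide_eq_true_eq] at h1
          subst h1
          simp [pvSingleDigitStr, pvDotChar]
      · rw [if_neg ?_, if_neg ?_, if_pos (by simp [pvSingleDigitStr, h1, h2])]
        · rw [hset]; exact ih (cur ++ [c]) done
        · have : PySem.Chars.strIsdigit cur = false :=
            pvDotNotDigitStr cur ((pvIsInDot cur).mp h2)
          simp [this]
        · have : PySem.Chars.strIsdigit cur = false :=
            pvDotNotDigitStr cur ((pvIsInDot cur).mp h2)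
          simp [this]
    · have hm' : mergeQ cur c = false := by revert hm; cases mergeQ cur c <;> simp
      have hF : F cur (c :: rs) = cur :: F [c] rs := by simp [F, hm']
      simp only [mergeQ, Bool.or_eq_false_iff] at hm'
      obtain ⟨⟨b1, b2⟩, b3⟩ := hm'
      have hd2 : (decide ([c] = ['.']) : Bool) = decide (c = '.') := by simp
      rw [if_neg (by simp only [pvSingleDigitStr, b1]; simp),
          if_neg (by simp only [hd2, b2]; simp),
          if_neg (by simp only [pvSingleDigitStr, b3]; simp)]
      have heq : done ++ cur :: (c :: rs).map (fun c => [c]) =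
          (done ++ [cur]) ++ [c] :: rs.map (fun c => [c]) := by simp
      have hcnt : done.length + 1 + 1 = (done ++ [cur]).length + 1 := by simp
      rw [heq, hcnt, ih [c] (done ++ [cur])]
      simp [hF]

-- F with an all-digit / dot-containing open token is exactly B's scanner continuation
theorem pvScan : ∀ n : Nat,
    (∀ rest cur, rest.length ≤ n → '.' ∈ cur →
      F cur rest = (cur ++ (takeDigits rest).1) :: tokB (takeDigits rest).2) ∧
    (∀ rest cur, rest.length ≤ n → PySem.Chars.strIsdigit cur = true →
      F cur rest = (match (takeDigits rest).2 with
        | '.' :: r' => (cur ++ (takeDigits rest).1 ++ '.' :: (takeDigits r').1) :: tokB (takeDigits r').2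
        | _ => (cur ++ (takeDigits rest).1) :: tokB (takeDigits rest).2)) ∧
    (∀ cs c, cs.length ≤ n → F [c] cs = tokB (c :: cs)) := by
  intro n
  induction n with
  | zero =>
    refine ⟨?_, ?_, ?_⟩
    · intro rest cur h _
      have hl : rest = [] := List.length_eq_zero_iff.mp (by omega)
      subst hl
      simp [F, takeDigits]
    · intro rest cur h _
      have hl : rest = [] := List.length_eq_zero_iff.mp (by omega)
      subst hl
      simp [F, takeDigits]
    · intro cs c h
      have hl : cs = [] := List.length_eq_zero_iff.mp (by omega)
      subst hl
      by_cases hd : PySem.Chars.isdigit c = true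
      · rw [tokB]; simp [F, takeDigits, hd]
      · by_cases hp : c = '.'
        · subst hp; rw [tokB]; simp [F, takeDigits, pvDotChar]
        · rw [tokB]; simp [F, hd, hp]
  | succ n ih =>
    obtain ⟨ihP, ihD, ih0⟩ := ih
    have hP : ∀ rest cur, rest.length ≤ n + 1 → '.' ∈ cur →
        F cur rest = (cur ++ (takeDigits rest).1) :: tokB (takeDigits rest).2 := by
      intro rest cur h hdot
      match rest with
      | [] => simp [F, takeDigits]
      | c :: cs =>
        have hsd : PySem.Chars.strIsdigit cur = false := pvDotNotDigitStr cur hdot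
        by_cases hd : PySem.Chars.isdigit c = true
        · have hm : mergeQ cur c = true := by
            simp [mergeQ, hd, (pvIsInDot cur).mpr hdot]
          rw [show F cur (c :: cs) = F (cur ++ [c]) cs from by simp [F, hm]]
          rw [ihP cs (cur ++ [c]) (by simp at h; omega) (by simp [hdot])]
          simp [takeDigits, hd]
        · have hm : mergeQ cur c = false := by
            simp [mergeQ, hd, hsd]
          rw [show F cur (c :: cs) = cur :: F [c] cs from by simp [F, hm]]
          rw [ih0 cs c (by simp at h; omega)]
          simp [takeDigits, hd]
    have hD : ∀ rest cur, rest.length ≤ n + 1 → PySem.Chars.strIsdigit cur = true →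
        F cur rest = (match (takeDigits rest).2 with
          | '.' :: r' => (cur ++ (takeDigits rest).1 ++ '.' :: (takeDigits r').1) :: tokB (takeDigits r').2
          | _ => (cur ++ (takeDigits rest).1) :: tokB (takeDigits rest).2) := by
      intro rest cur h hcur
      match rest with
      | [] => simp [F, takeDigits]
      | c :: cs =>
        by_cases hd : PySem.Chars.isdigit c = true
        · have hm : mergeQ cur c = true := by simp [mergeQ, hd, hcur]
          rw [show F cur (c :: cs) = F (cur ++ [c]) cs from by simp [F, hm]]
          have hcur' : PySem.Chars.strIsdigit (cur ++ [c]) = true := by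
            simp only [PySem.Chars.strIsdigit, Bool.and_eq_true, List.all_eq_true] at hcur ⊢
            refine ⟨by simp, fun x hx => ?_⟩
            rcases List.mem_append.mp hx with hx | hx
            · exact hcur.2 x hx
            · simpa [List.mem_singleton.mp hx] using hd
          rw [ihD cs (cur ++ [c]) (by simp at h; omega) hcur']
          simp only [takeDigits, hd, if_pos]
          split <;> simp
        · by_cases hp : c = '.'
          · subst hp
            have hm : mergeQ cur '.' = true := by simp [mergeQ, hcur]
            rw [show F cur ('.' :: cs) = F (cur ++ ['.']) cs from by simp [F, hm]]
            rw [ihP cs (cur ++ ['.']) (by simp at h; omega) (by simp)]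
            simp [takeDigits, pvDotChar]
          · have hm : mergeQ cur c = false := by simp [mergeQ, hd, hp]
            rw [show F cur (c :: cs) = cur :: F [c] cs from by simp [F, hm]]
            rw [ih0 cs c (by simp at h; omega)]
            simp only [takeDigits, hd, Bool.false_eq_true, if_false]
            split
            · rename_i r' heq
              injection heq with h1 h2
              exact absurd h1 hp
            · simp
    refine ⟨hP, hD, ?_⟩
    intro cs c h
    by_cases hd : PySem.Chars.isdigit c = true
    · rw [hD cs [c] h (by simp [pvSingleDigitStr, hd])]
      rw [tokB]
      simp only [hd, if_true]
      split
      · rename_i r1 heq1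
        split
        · rename_i r2 heq2
          rw [heq1] at heq2
          injection heq2 with h1 h2
          subst h2
          simp
        · rename_i hcon
          exact (hcon r1 heq1).elim
      · rename_i hcon
        split
        · rename_i r2 heq2
          rw [heq2] at hcon
          exact (hcon r2 rfl).elim
        · simp
    · by_cases hp : c = '.'
      · subst hp
        rw [hP cs ['.'] h (by simp)]
        rw [tokB]
        simp [pvDotChar]
      · rw [tokB]
        simp only [hd, Bool.false_eq_true, if_false, hp]
        match cs with
        | [] => simp [F]
        | c' :: cs' =>
          have hni : PySem.Chars.isIn ['.'] [c] = false := by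
            rw [← Bool.not_eq_true, pvIsInDot]
            simp only [List.mem_singleton]
            exact fun hx => hp hx.symm
          have hm : mergeQ [c] c' = false := by
            simp [mergeQ, pvSingleDigitStr, hd, hni]
          rw [show F [c] (c' :: cs') = [c] :: F [c'] cs' from by simp [F, hm]]
          rw [ih0 cs' c' (by simp at h; omega)]

theorem remSpaces_eq (s : List Char) : remSpaces s = s.filter (· ≠ ' ') := by
  by_cases h : PySem.Chars.isIn [' '] s = true
  · rw [remSpaces, if_pos h, pvReplaceSpace, remSpaces]
    rw [if_neg (by rw [pvIsInSpace]; simp)]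
  · rw [remSpaces, if_neg h]
    rw [pvIsInSpace] at h
    refine (List.filter_eq_self.mpr (fun c hc => ?_)).symm
    simp only [ne_eq, decide_eq_true_eq]
    exact fun he => h (he ▸ hc)

-- ===== VERDICT (by name: the statement is the Claim_ definition above) =====
theorem preparation_spec : Claim_equal_preparation := by
  intro expression _
  unfold Spec_preparation preparation preparation_alt
  rw [remSpaces_eq, pvReplaceSpace]
  congr 1
  match hcs : expression.toList.filter (· ≠ ' ') with
  | [] =>
    rw [loopA]
    simp
  | c :: rest =>
    have h0 := loopA_canon rest [c] []
    simp only [List.nil_append, List.length_nil, Nat.zero_add] at h0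
    rw [List.map_cons, h0]
    exact (pvScan rest.length).2.2 rest c le_rfl
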